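-- pv_equiv track=rewrite | github.com/SuLab/bshvl | py/util.py | is_gene_list
-- ===== SOURCE A (Python) =====
-- def is_gene_list(kind, ws, dict_gene_symbols_all):
--     assert kind in ["A", "B"], "Invalid gene list type."
--
--     if kind == "A":
--         vals = ["_", ",", "_"]
--
--         return all(
--             vals[i%4] == v if i%4 < 3 else v in dict_gene_symbols_all
--             for i, v in enumerate(ws)
--         )
--
--     # gene list type B
--     return all(
--         v == "," if i%2 == 0 else v in dict_gene_symbols_all
--         for i, v in enumerate(ws)
--     )
-- ===== SOURCE B (Python) =====
-- def is_gene_list(kind, ws, dict_gene_symbols_all):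
--     assert kind in ["A", "B"], "Invalid gene list type."
--
--     if kind == "A":
--         return (all(v == "_" for v in ws[0::4])
--                 and all(v == "," for v in ws[1::4])
--                 and all(v == "_" for v in ws[2::4])
--                 and all(v in dict_gene_symbols_all for v in ws[3::4]))
--
--     # gene list type B
--     return (all(v == "," for v in ws[0::2])
--             and all(v in dict_gene_symbols_all for v in ws[1::2]))
-- ===== Notes on version B (the rewrite author's own statement) =====
-- stated objective: simpler
-- what changed: Replaces the single enumerate+modulo pass with a per-residue-class decomposition: strided slices ws[r::4] (kind A) and ws[r::2] (kind B), each checked by one uniform all(), ANDed together.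
import Mathlib
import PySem

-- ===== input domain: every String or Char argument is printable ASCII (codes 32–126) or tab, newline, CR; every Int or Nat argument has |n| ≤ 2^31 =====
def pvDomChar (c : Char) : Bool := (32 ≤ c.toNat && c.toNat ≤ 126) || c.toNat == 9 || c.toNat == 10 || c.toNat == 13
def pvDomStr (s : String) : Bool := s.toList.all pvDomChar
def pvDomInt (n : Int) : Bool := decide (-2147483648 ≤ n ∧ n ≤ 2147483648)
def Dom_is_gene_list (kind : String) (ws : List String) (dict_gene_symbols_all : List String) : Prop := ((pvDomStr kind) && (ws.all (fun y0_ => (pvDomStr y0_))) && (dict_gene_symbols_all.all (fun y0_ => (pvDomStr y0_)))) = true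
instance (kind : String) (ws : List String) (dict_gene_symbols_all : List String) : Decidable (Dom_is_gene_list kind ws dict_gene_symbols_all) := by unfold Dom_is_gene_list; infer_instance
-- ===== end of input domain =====

-- B replaces A's single enumerate+modulo pass by per-residue-class strided passes ANDed together (objective: simpler).

-- ===== PORT A =====
def is_gene_list (kind : String) (ws : List String) (dict_gene_symbols_all : List String) : Bool :=
  if kind == "A" then
    -- vals[i%4] is only evaluated under the guard i%4 < 3, so the pyGetD default is never used
    (PySem.List.enumerate ws).all (fun p =>
      if PySem.Int.mod p.1 4 < 3 then
        PySem.List.pyGetD ["_", ",", "_"] (PySem.Int.mod p.1 4) "" == p.2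
      else dict_gene_symbols_all.contains p.2)
  else
    (PySem.List.enumerate ws).all (fun p =>
      if PySem.Int.mod p.1 2 == 0 then p.2 == "," else dict_gene_symbols_all.contains p.2)

-- ===== PORT B =====
-- Hand port of the Python slice xs[s::m]: the elements whose index i satisfies s ≤ i and (i-s) % m == 0.
-- Exact for 0 ≤ s and 0 < m (the only uses here).
def pyStrideOf (s m : Int) (l : List (Int × String)) : List String :=
  (l.filter (fun p => decide (s ≤ p.1) && (PySem.Int.mod (p.1 - s) m == 0))).map Prod.snd

def pyStride (xs : List String) (s m : Int) : List String :=
  pyStrideOf s m (PySem.List.enumerate xs)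

def is_gene_list_alt (kind : String) (ws : List String) (dict_gene_symbols_all : List String) : Bool :=
  if kind == "A" then
    (pyStride ws 0 4).all (fun v => v == "_") &&
    (pyStride ws 1 4).all (fun v => v == ",") &&
    (pyStride ws 2 4).all (fun v => v == "_") &&
    (pyStride ws 3 4).all (fun v => dict_gene_symbols_all.contains v)
  else
    (pyStride ws 0 2).all (fun v => v == ",") &&
    (pyStride ws 1 2).all (fun v => dict_gene_symbols_all.contains v)

-- ===== PRECONDITION & SPEC =====
-- Pre_ excludes exactly the inputs on which the Python A's assert raises (kind not "A"/"B"); B raises there too.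
def Pre_is_gene_list (kind : String) (ws : List String) (dict_gene_symbols_all : List String) : Prop :=
  kind = "A" ∨ kind = "B"
instance (kind : String) (ws : List String) (dict_gene_symbols_all : List String) : Decidable (Pre_is_gene_list kind ws dict_gene_symbols_all) := by unfold Pre_is_gene_list; infer_instance

def pvWitness_is_gene_list : String × List String × List String := ("A", ["_", ",", "_", "TP53"], ["TP53"])

def Spec_is_gene_list (kind : String) (ws : List String) (dict_gene_symbols_all : List String) (out : Bool) : Prop := out = is_gene_list_alt kind ws dict_gene_symbols_all
instance (kind : String) (ws : List String) (dict_gene_symbols_all : List String) (out : Bool) : Decidable (Spec_is_gene_list kind ws dict_gene_symbols_all out) := by unfold Spec_is_gene_list; infer_instance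

-- ===== CLAIM (what is proved, stated in full; the proofs are below) =====
def Claim_equal_is_gene_list : Prop := ∀ (kind : String) (ws : List String) (dict_gene_symbols_all : List String), Dom_is_gene_list kind ws dict_gene_symbols_all → Pre_is_gene_list kind ws dict_gene_symbols_all → Spec_is_gene_list kind ws dict_gene_symbols_all (is_gene_list kind ws dict_gene_symbols_all)

-- ===== LEMMAS AND PROOFS =====

lemma pv_all_pyStrideOf (s m : Int) (l : List (Int × String)) (f : String → Bool) :
    (pyStrideOf s m l).all f
      = l.all (fun p => !(decide (s ≤ p.1) && (PySem.Int.mod (p.1 - s) m == 0)) || f p.2) := by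
  simp [pyStrideOf, List.all_map, List.all_filter, Function.comp]

lemma pv_all_and (l : List (Int × String)) (f g : Int × String → Bool) :
    (l.all fun p => f p && g p) = (l.all f && l.all g) := by
  induction l with
  | nil => rfl
  | cons a l ih => simp only [List.all_cons, ih]; cases f a <;> cases g a <;> simp

lemma pv_all_congr_mem (l : List (Int × String)) (f g : Int × String → Bool)
    (h : ∀ p ∈ l, f p = g p) : l.all f = l.all g := by
  induction l with
  | nil => rfl
  | cons a l ih =>
    simp only [List.all_cons, h a (List.mem_cons_self ..),
      ih (fun p hp => h p (List.mem_cons_of_mem a hp))]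

lemma pv_pointA (dict : List String) (k : Nat) (v : String) :
    (if PySem.Int.mod (k : Int) 4 < 3 then
        PySem.List.pyGetD ["_", ",", "_"] (PySem.Int.mod (k : Int) 4) "" == v
      else dict.contains v)
      = ((!(decide ((0:Int) ≤ (k : Int)) && (PySem.Int.mod ((k : Int) - 0) 4 == 0)) || (v == "_"))
        && (!(decide ((1:Int) ≤ (k : Int)) && (PySem.Int.mod ((k : Int) - 1) 4 == 0)) || (v == ","))
        && (!(decide ((2:Int) ≤ (k : Int)) && (PySem.Int.mod ((k : Int) - 2) 4 == 0)) || (v == "_"))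
        && (!(decide ((3:Int) ≤ (k : Int)) && (PySem.Int.mod ((k : Int) - 3) 4 == 0)) || dict.contains v)) := by
  simp only [PySem.Int.mod_eq_emod_of_pos (show (0:Int) < 4 by norm_num)]
  have h4 : (k : Int) % 4 = 0 ∨ (k : Int) % 4 = 1 ∨ (k : Int) % 4 = 2 ∨ (k : Int) % 4 = 3 := by omega
  have d0 : (decide ((0:Int) ≤ (k : Int))) = true := by simp
  rcases h4 with h | h | h | h <;>
    simp only [d0, Bool.true_and, show ((k:Int) - 0) = (k:Int) by ring]
  · rw [show (((k : Int)) % 4 == 0) = true from by simp [h],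
        show (decide ((1:Int) ≤ (k : Int)) && (((k : Int) - 1) % 4 == 0)) = false from by
          by_cases h1 : (1:Int) ≤ (k : Int) <;> simp [h1] <;> omega,
        show (decide ((2:Int) ≤ (k : Int)) && (((k : Int) - 2) % 4 == 0)) = false from by
          by_cases h1 : (2:Int) ≤ (k : Int) <;> simp [h1] <;> omega,
        show (decide ((3:Int) ≤ (k : Int)) && (((k : Int) - 3) % 4 == 0)) = false from by
          by_cases h1 : (3:Int) ≤ (k : Int) <;> simp [h1] <;> omega]
    simp [h, PySem.List.pyGetD, Bool.beq_comm]
  · rw [show (((k : Int)) % 4 == 0) = false from by simp [h],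
        show (decide ((1:Int) ≤ (k : Int)) && (((k : Int) - 1) % 4 == 0)) = true from by simp; omega,
        show (decide ((2:Int) ≤ (k : Int)) && (((k : Int) - 2) % 4 == 0)) = false from by
          by_cases h1 : (2:Int) ≤ (k : Int) <;> simp [h1] <;> omega,
        show (decide ((3:Int) ≤ (k : Int)) && (((k : Int) - 3) % 4 == 0)) = false from by
          by_cases h1 : (3:Int) ≤ (k : Int) <;> simp [h1] <;> omega]
    simp [h, PySem.List.pyGetD, Bool.beq_comm]
  · rw [show (((k : Int)) % 4 == 0) = false from by simp [h],
        show (decide ((1:Int) ≤ (k : Int)) && (((k : Int) - 1) % 4 == 0)) = false from by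
          by_cases h1 : (1:Int) ≤ (k : Int) <;> simp [h1] <;> omega,
        show (decide ((2:Int) ≤ (k : Int)) && (((k : Int) - 2) % 4 == 0)) = true from by simp; omega,
        show (decide ((3:Int) ≤ (k : Int)) && (((k : Int) - 3) % 4 == 0)) = false from by
          by_cases h1 : (3:Int) ≤ (k : Int) <;> simp [h1] <;> omega]
    simp [h, PySem.List.pyGetD, Bool.beq_comm]
  · rw [show (((k : Int)) % 4 == 0) = false from by simp [h],
        show (decide ((1:Int) ≤ (k : Int)) && (((k : Int) - 1) % 4 == 0)) = false from by
          by_cases h1 : (1:Int) ≤ (k : Int) <;> simp [h1] <;> omega,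
        show (decide ((2:Int) ≤ (k : Int)) && (((k : Int) - 2) % 4 == 0)) = false from by
          by_cases h1 : (2:Int) ≤ (k : Int) <;> simp [h1] <;> omega,
        show (decide ((3:Int) ≤ (k : Int)) && (((k : Int) - 3) % 4 == 0)) = true from by simp; omega]
    simp [h]

lemma pv_pointB (dict : List String) (k : Nat) (v : String) :
    (if (PySem.Int.mod (k : Int) 2 == 0) then (v == ",") else dict.contains v)
      = ((!(decide ((0:Int) ≤ (k : Int)) && (PySem.Int.mod ((k : Int) - 0) 2 == 0)) || (v == ","))
        && (!(decide ((1:Int) ≤ (k : Int)) && (PySem.Int.mod ((k : Int) - 1) 2 == 0)) || dict.contains v)) := by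
  simp only [PySem.Int.mod_eq_emod_of_pos (show (0:Int) < 2 by norm_num)]
  have h2 : (k : Int) % 2 = 0 ∨ (k : Int) % 2 = 1 := by omega
  have d0 : (decide ((0:Int) ≤ (k : Int))) = true := by simp
  rcases h2 with h | h <;>
    simp only [d0, Bool.true_and, show ((k:Int) - 0) = (k:Int) by ring]
  · rw [show (((k : Int)) % 2 == 0) = true from by simp [h],
        show (decide ((1:Int) ≤ (k : Int)) && (((k : Int) - 1) % 2 == 0)) = false from by
          by_cases h1 : (1:Int) ≤ (k : Int) <;> simp [h1] <;> omega]
    simp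
  · rw [show (((k : Int)) % 2 == 0) = false from by simp [h],
        show (decide ((1:Int) ≤ (k : Int)) && (((k : Int) - 1) % 2 == 0)) = true from by
          simp <;> omega]
    simp

-- ===== VERDICT (by name: the statement is the Claim_ definition above) =====
theorem is_gene_list_spec : Claim_equal_is_gene_list := by
  intro kind ws dict _ _
  unfold Spec_is_gene_list is_gene_list is_gene_list_alt pyStride
  by_cases hk : kind == "A"
  · rw [if_pos hk, if_pos hk,
        pv_all_pyStrideOf, pv_all_pyStrideOf, pv_all_pyStrideOf, pv_all_pyStrideOf,
        ← pv_all_and, ← pv_all_and, ← pv_all_and]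
    apply pv_all_congr_mem
    intro p hp
    obtain ⟨k, hk', rfl⟩ := (PySem.List.mem_enumerate_iff ws 0 p).mp hp
    simpa using pv_pointA dict k ws[k]
  · rw [if_neg hk, if_neg hk, pv_all_pyStrideOf, pv_all_pyStrideOf, ← pv_all_and]
    apply pv_all_congr_mem
    intro p hp
    obtain ⟨k, hk', rfl⟩ := (PySem.List.mem_enumerate_iff ws 0 p).mp hp
    simpa using pv_pointB dict k ws[k]
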